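-- pv_equiv track=rewrite | github.com/acl2023-anonymous-submission/AeNER | model/multispan_heads.py | remove_substring_from_prediction
-- ===== SOURCE A (Python) =====
-- def remove_substring_from_prediction(spans):
--     new_spans = []
--     lspans = [s.lower() for s in spans]
--
--     for span in spans:
--         lspan = span.lower()
--
--         if lspans.count(lspan) > 1:
--             lspans.remove(lspan)
--             continue
--
--         if not any(
--             (
--                 lspan + " " in s
--                 or " " + lspan in s
--                 or lspan + "s" in s
--                 or lspan + "n" in s
--                 or (lspan in s and not s.startswith(lspan) and not s.endswith(lspan))
--             )
--             and lspan != s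
--             for s in lspans
--         ):
--             new_spans.append(span)
--
--     return new_spans
-- ===== SOURCE B (Python) =====
-- def remove_substring_from_prediction(spans):
--     lowered = [s.lower() for s in spans]
--     distinct = set(lowered)
--
--     def absorbed(lspan):
--         return any(
--             (
--                 lspan + " " in s
--                 or " " + lspan in s
--                 or lspan + "s" in s
--                 or lspan + "n" in s
--                 or (lspan in s and not s.startswith(lspan) and not s.endswith(lspan))
--             )
--             and lspan != s
--             for s in distinct
--         )
--
--     # walk the spans back to front, keeping only the last occurrence of each
--     # lowercased value, then restore the original order
--     out = []
--     seen = set()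
--     for span, lspan in zip(reversed(spans), reversed(lowered)):
--         if lspan not in seen:
--             seen.add(lspan)
--             if not absorbed(lspan):
--                 out.append(span)
--     out.reverse()
--     return out
-- ===== Notes on version B (the rewrite author's own statement) =====
-- stated objective: alternative
-- what changed: A mutates lspans while iterating (count>1 then remove) to drop all but the last occurrence; B precomputes the distinct lowercased spans once and does a single mutation-free reverse pass with a seen-set, keeping the last occurrence of each lowercased value and testing the same OR-chain against the distinct set, then restores the original order.
import Mathlib
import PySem

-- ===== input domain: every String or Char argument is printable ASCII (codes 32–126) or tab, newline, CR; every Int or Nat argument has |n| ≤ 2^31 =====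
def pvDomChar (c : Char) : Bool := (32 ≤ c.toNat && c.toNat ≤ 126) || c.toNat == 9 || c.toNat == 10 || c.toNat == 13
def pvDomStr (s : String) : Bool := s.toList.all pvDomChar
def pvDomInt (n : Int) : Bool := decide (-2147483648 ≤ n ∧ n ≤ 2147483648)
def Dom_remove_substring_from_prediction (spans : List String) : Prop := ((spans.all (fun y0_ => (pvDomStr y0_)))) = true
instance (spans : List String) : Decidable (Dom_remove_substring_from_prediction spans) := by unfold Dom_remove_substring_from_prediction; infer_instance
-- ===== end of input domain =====

-- B replaces A's list mutation during iteration (count/remove on lspans) by a single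
-- mutation-free reverse pass with a seen-set that keeps the last occurrence of each
-- lowercased span, testing the OR-chain against the set of distinct lowercased spans.

-- ===== PORT A =====
-- s.lower(), on char lists (PySem.Chars is exact on the ASCII domain)
def pvLow (s : String) : List Char := PySem.Chars.lower s.toList

-- the generator body 'any((... or ...) and lspan != s for s in ls)', transliterated
def pvAbsorbs (l : List Char) (ls : List (List Char)) : Bool :=
  ls.any (fun s =>
    (PySem.Chars.isIn (l ++ [' ']) s
      || PySem.Chars.isIn ([' '] ++ l) s
      || PySem.Chars.isIn (l ++ ['s']) s
      || PySem.Chars.isIn (l ++ ['n']) s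
      || (PySem.Chars.isIn l s && !PySem.Chars.startswith s l && !PySem.Chars.endswith s l))
    && l != s)

-- A's 'for span in spans' loop, with the mutated list lspans as explicit state
def pvALoop : List String → List (List Char) → List String
  | [], _ => []
  | span :: rest, ls =>
    let l := pvLow span
    if ls.count l > 1 then
      -- lspans.remove(lspan); l ∈ ls here (count > 1), so remove? is never none
      pvALoop rest ((PySem.List.remove? ls l).getD ls)
    else if pvAbsorbs l ls then
      pvALoop rest ls
    else
      span :: pvALoop rest ls

def remove_substring_from_prediction (spans : List String) : List String :=
  pvALoop spans (spans.map pvLow)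

-- ===== PORT B =====
-- the body of B's 'for span, lspan in zip(reversed(spans), reversed(lowered))' loop
def pvBStep (distinct : PySem.Set (List Char))
    (st : PySem.Set (List Char) × List String) (x : String × List Char) :
    PySem.Set (List Char) × List String :=
  if PySem.Set.contains st.1 x.2 then st
  else (PySem.Set.add st.1 x.2,
        if pvAbsorbs x.2 distinct then st.2 else st.2 ++ [x.1])

def remove_substring_from_prediction_alt (spans : List String) : List String :=
  let lowered := spans.map pvLow
  let distinct : PySem.Set (List Char) := PySem.Set.ofList lowered
  let p := ((spans.zip lowered).reverse).foldl (pvBStep distinct) (PySem.Set.empty, [])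
  p.2.reverse

-- ===== PRECONDITION & SPEC =====
def Spec_remove_substring_from_prediction (spans : List String) (out : List String) : Prop := out = remove_substring_from_prediction_alt spans
instance (spans : List String) (out : List String) : Decidable (Spec_remove_substring_from_prediction spans out) := by unfold Spec_remove_substring_from_prediction; infer_instance

-- ===== CLAIM (what is proved, stated in full; the proofs are below) =====
def Claim_equal_remove_substring_from_prediction : Prop := ∀ (spans : List String), Dom_remove_substring_from_prediction spans → Spec_remove_substring_from_prediction spans (remove_substring_from_prediction spans)

-- ===== LEMMAS AND PROOFS =====

-- common characterisation of both programs: keep a span iff its lowered form occurs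
-- neither later in the list nor in 'seen', and is not absorbed by a distinct span
def pvSpecGo (ds seen : List (List Char)) : List (String × List Char) → List String
  | [] => []
  | (span, l) :: rest =>
    if l ∈ rest.map Prod.snd ∨ l ∈ seen then pvSpecGo ds seen rest
    else if pvAbsorbs l ds then pvSpecGo ds seen rest
    else span :: pvSpecGo ds seen rest

lemma pvAny_mem_congr {α : Type} {p : α → Bool} {xs ys : List α}
    (h : ∀ v, v ∈ xs ↔ v ∈ ys) : xs.any p = ys.any p := by
  apply Bool.eq_iff_iff.mpr
  simp only [List.any_eq_true]
  constructor
  · rintro ⟨v, hv, hp⟩; exact ⟨v, (h v).1 hv, hp⟩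
  · rintro ⟨v, hv, hp⟩; exact ⟨v, (h v).2 hv, hp⟩

lemma pvALoop_eq (ds : List (List Char)) :
    ∀ (spans : List String) (ls : List (List Char)),
      (∀ v, v ∈ ls ↔ v ∈ ds) →
      (∀ v, ls.count v = max ((spans.map pvLow).count v) (if v ∈ ds then 1 else 0)) →
      pvALoop spans ls = pvSpecGo ds [] (spans.zip (spans.map pvLow)) := by
  intro spans
  induction spans with
  | nil => intro ls _ _; rfl
  | cons span rest ih =>
    intro ls hmem hcount
    have hzip : (span :: rest).zip ((span :: rest).map pvLow)
        = (span, pvLow span) :: rest.zip (rest.map pvLow) := by simp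
    have hsnd : (rest.zip (rest.map pvLow)).map Prod.snd = rest.map pvLow := by
      apply List.map_snd_zip
      simp
    set l := pvLow span with hl
    have hcnt_head : ((span :: rest).map pvLow).count l
        = (rest.map pvLow).count l + 1 := by
      simp [hl]
    have hcnt_ne : ∀ v, v ≠ l → ((span :: rest).map pvLow).count v = (rest.map pvLow).count v := by
      intro v hv
      have hne : (pvLow span == v) = false := beq_eq_false_iff_ne.mpr (fun h => hv (hl ▸ h.symm))
      simp [List.count_cons, hne]
    have hl_ls : l ∈ ls := by
      rw [← List.count_pos_iff, hcount l, hcnt_head]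
      omega
    have hl_ds : l ∈ ds := (hmem l).1 hl_ls
    have hcount_l : ls.count l = (rest.map pvLow).count l + 1 := by
      rw [hcount l, hcnt_head, if_pos hl_ds]
      omega
    by_cases hdup : l ∈ rest.map pvLow
    · -- duplicate: A removes one copy and skips; spec skips
      have hc : 0 < (rest.map pvLow).count l := List.count_pos_iff.mpr hdup
      have hgt : ls.count l > 1 := by omega
      rw [pvALoop, if_pos hgt, PySem.List.remove?_eq_some_erase ls l hl_ls,
        Option.getD_some, hzip, pvSpecGo, if_pos (by rw [hsnd]; exact Or.inl hdup)]
      apply ih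
      · intro v
        by_cases hv : v = l
        · subst hv
          constructor
          · intro _; exact hl_ds
          · intro _
            rw [← List.count_pos_iff, List.count_erase, hcount_l, beq_self_eq_true, if_pos rfl]
            omega
        · rw [List.mem_erase_of_ne hv]
          exact hmem v
      · intro v
        rw [List.count_erase, hcount v]
        by_cases hv : v = l
        · subst hv
          rw [hcnt_head, if_pos hl_ds, beq_self_eq_true, if_pos rfl]
          omega
        · have hlv : (l == v) = false := beq_eq_false_iff_ne.mpr (fun h => hv h.symm)
          rw [hlv]
          simp only [Bool.false_eq_true, if_false, Nat.sub_zero]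
          rw [hcnt_ne v hv]
    · -- last occurrence: A keeps lspans and runs the substring test
      have hc0 : (rest.map pvLow).count l = 0 := by
        rw [List.count_eq_zero]
        exact hdup
      have hng : ¬ ls.count l > 1 := by omega
      have habs : pvAbsorbs l ls = pvAbsorbs l ds := pvAny_mem_congr hmem
      have hcount' : ∀ v, ls.count v = max ((rest.map pvLow).count v) (if v ∈ ds then 1 else 0) := by
        intro v
        rw [hcount v]
        by_cases hv : v = l
        · subst hv
          rw [hcnt_head, hc0, if_pos hl_ds]
          omega
        · rw [hcnt_ne v hv]
      have hnotin : ¬ (l ∈ (rest.zip (rest.map pvLow)).map Prod.snd ∨ l ∈ ([] : List (List Char))) := by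
        rw [hsnd]
        simp [hdup]
      rw [pvALoop, if_neg hng, hzip, pvSpecGo, if_neg hnotin, habs]
      by_cases hab : pvAbsorbs l ds = true
      · rw [if_pos hab, if_pos hab]
        exact ih ls hmem hcount'
      · rw [if_neg hab, if_neg hab]
        rw [ih ls hmem hcount']

lemma pvBLoop_eq (ds : List (List Char)) :
    ∀ (pairs : List (String × List Char)) (seen : PySem.Set (List Char)) (acc : List String),
      pairs.reverse.foldl (pvBStep ds) (seen, acc)
        = (PySem.Set.update seen (pairs.reverse.map Prod.snd),
           acc ++ (pvSpecGo ds seen pairs).reverse) := by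
  intro pairs
  induction pairs with
  | nil => intro seen acc; simp [PySem.Set.update, pvSpecGo]
  | cons x rest ih =>
    intro seen acc
    obtain ⟨span, l⟩ := x
    rw [List.reverse_cons, List.foldl_append, ih seen acc]
    set S := PySem.Set.update seen (rest.reverse.map Prod.snd) with hS
    have hSmem : l ∈ S ↔ l ∈ rest.map Prod.snd ∨ l ∈ seen := by
      rw [hS, PySem.Set.mem_update]
      simp [List.mem_reverse]
      tauto
    have hupd : PySem.Set.update seen ((rest.reverse.map Prod.snd) ++ [l])
        = PySem.Set.add S l := by
      rw [PySem.Set.update_append, hS.symm]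
      rfl
    by_cases hin : l ∈ rest.map Prod.snd ∨ l ∈ seen
    · have : PySem.Set.contains S l = true := (PySem.Set.contains_iff S l).mpr (hSmem.mpr hin)
      simp only [List.foldl_cons, List.foldl_nil, pvBStep, this, if_pos]
      rw [pvSpecGo, if_pos hin]
      simp only [List.map_append, List.map_cons, List.map_nil, hupd,
        PySem.Set.add_of_mem (hSmem.mpr hin)]
    · have hnc : PySem.Set.contains S l = false := by
        rw [← Bool.not_eq_true, PySem.Set.contains_iff]
        intro h
        exact hin (hSmem.mp h)
      simp only [List.foldl_cons, List.foldl_nil, pvBStep, hnc, Bool.false_eq_true,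
        ite_false]
      rw [pvSpecGo, if_neg hin]
      simp only [List.map_append, List.map_cons, List.map_nil, hupd]
      by_cases hab : pvAbsorbs l ds = true
      · rw [if_pos hab, if_pos hab]
      · rw [if_neg hab, if_neg hab, List.reverse_cons, ← List.append_assoc]

-- ===== VERDICT (by name: the statement is the Claim_ definition above) =====
theorem remove_substring_from_prediction_spec : Claim_equal_remove_substring_from_prediction := by
  intro spans _
  unfold Spec_remove_substring_from_prediction
  have hB : remove_substring_from_prediction_alt spans
      = (([] : List String) ++ (pvSpecGo (PySem.Set.ofList (spans.map pvLow)) PySem.Set.empty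
          (spans.zip (spans.map pvLow))).reverse).reverse := by
    show ((((spans.zip (spans.map pvLow)).reverse).foldl
        (pvBStep (PySem.Set.ofList (spans.map pvLow)))
        (PySem.Set.empty, ([] : List String))).2).reverse = _
    rw [pvBLoop_eq]
  rw [hB]
  simp only [List.nil_append, List.reverse_reverse]
  show pvALoop spans (spans.map pvLow) = _
  apply pvALoop_eq
  · intro v
    rw [PySem.Set.mem_ofList]
  · intro v
    by_cases hv : v ∈ PySem.Set.ofList (spans.map pvLow)
    · rw [if_pos hv]
      have : 0 < (spans.map pvLow).count v :=
        List.count_pos_iff.mpr ((PySem.Set.mem_ofList _ _).mp hv)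
      omega
    · rw [if_neg hv, List.count_eq_zero.mpr (fun h => hv ((PySem.Set.mem_ofList _ _).mpr h))]
      omega
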